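-- pv_equiv track=rewrite | github.com/snji-khjuria/OntologyBuilder | LocalDictTagger2.py | getSentenceStr
-- ===== SOURCE A (Python) =====
-- def getSentenceStr(l):
--     result = ""
--     prevTag = ""
--     for (word, tag) in l:
--         if tag!="O":
--             if tag==prevTag:
--                 mytag="I-"+tag
--             else:
--                 mytag = "B-"+tag
--         else:
--             mytag = "O"
--         result+=" " + word+"/" + mytag
--         prevTag = tag
--     return result
-- ===== SOURCE B (Python) =====
-- def getSentenceStr(l):
--     # run-based: split into maximal runs of equal tag, first of a non-O run gets B-, rest I-
--     parts = []
--     i = 0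
--     n = len(l)
--     while i < n:
--         tag = l[i][1]
--         j = i
--         while j < n and l[j][1] == tag:
--             j += 1
--         if tag == "O":
--             for w, _ in l[i:j]:
--                 parts.append(" " + w + "/O")
--         else:
--             parts.append(" " + l[i][0] + "/B-" + tag)
--             for w, _ in l[i + 1:j]:
--                 parts.append(" " + w + "/I-" + tag)
--         i = j
--     return "".join(parts)
-- ===== Notes on version B (the rewrite author's own statement) =====
-- stated objective: alternative
-- what changed: B splits the sequence into maximal runs of equal tag and emits each run's pieces at once (B- for the run head, I- for the rest, O for O-runs), joining at the end, instead of A's element-by-element loop carrying prevTag and growing the string by +=.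
-- intended difference: On inputs whose first pair's tag is the empty string, A tags the first word I- (an accident of initializing prevTag to ""), while B tags it B- as a run start should be; elsewhere the outputs are identical. — e.g. on getSentenceStr([("w", "")]): A returns " w/I-", B returns " w/B-"
import Mathlib
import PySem

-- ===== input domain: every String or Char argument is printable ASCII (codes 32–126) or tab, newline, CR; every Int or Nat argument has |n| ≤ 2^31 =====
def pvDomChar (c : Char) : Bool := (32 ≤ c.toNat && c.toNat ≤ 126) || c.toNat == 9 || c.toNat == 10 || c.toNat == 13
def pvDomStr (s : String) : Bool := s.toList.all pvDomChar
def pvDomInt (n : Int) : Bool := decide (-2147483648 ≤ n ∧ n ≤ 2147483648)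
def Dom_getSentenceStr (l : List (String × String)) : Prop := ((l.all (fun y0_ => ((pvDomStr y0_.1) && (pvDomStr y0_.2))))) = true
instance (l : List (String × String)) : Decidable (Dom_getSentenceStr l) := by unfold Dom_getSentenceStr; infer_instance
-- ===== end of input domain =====

-- B re-implements the BIO tagger run-by-run (maximal runs of equal tag; first of a
-- non-O run gets "B-"), an alternative decomposition of the same cost; on inputs whose
-- FIRST tag is the empty string A's prevTag="" initialization accidentally yields "I-"
-- where B yields the intended run-start "B-" (stated as D_ below).


-- ===== PORT A =====
-- A's for-loop over (word, tag), carrying the accumulated `result` and `prevTag`.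
def getSentenceStrGo : List (String × String) → String → String → String
  | [], result, _ => result
  | (word, tag) :: rest, result, prevTag =>
    let mytag := if tag ≠ "O" then (if tag == prevTag then "I-" ++ tag else "B-" ++ tag) else "O"
    getSentenceStrGo rest (result ++ " " ++ word ++ "/" ++ mytag) tag

def getSentenceStr (l : List (String × String)) : String :=
  getSentenceStrGo l "" ""

-- ===== PORT B =====
-- Source B's outer while-loop: peel one maximal run of the head's tag per step (the inner
-- `while j < n and l[j][1] == tag` scan = takeWhile/dropWhile), emit the run's pieces,
-- continue with the remainder; the loop is ported with a fuel counter (= list length,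
-- an upper bound on the number of outer iterations), "".join at the end.
def getSentenceStrAltGo : Nat → List (String × String) → List String
  | 0, _ => []
  | _ + 1, [] => []
  | fuel + 1, (w, t) :: rest =>
    let same := rest.takeWhile (fun p => p.2 == t)
    let restL := rest.dropWhile (fun p => p.2 == t)
    (if t == "O" then (" " ++ w ++ "/O") :: same.map (fun p => " " ++ p.1 ++ "/O")
     else (" " ++ w ++ "/B-" ++ t) :: same.map (fun p => " " ++ p.1 ++ "/I-" ++ t))
    ++ getSentenceStrAltGo fuel restL

def getSentenceStr_alt (l : List (String × String)) : String :=
  String.join (getSentenceStrAltGo l.length l)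

-- ===== PRECONDITION & SPEC =====
-- Intended difference: on inputs whose first pair's tag is the empty string, A returns
-- "…/I-" for that first word (an accident of initializing prevTag to ""), while B returns
-- the intended run-start "…/B-"; everywhere else the outputs are identical.
def D_getSentenceStr (l : List (String × String)) : Prop :=
  l.head?.map Prod.snd = some ""
instance (l : List (String × String)) : Decidable (D_getSentenceStr l) := by
  unfold D_getSentenceStr; infer_instance

def Spec_getSentenceStr (l : List (String × String)) (out : String) : Prop :=
  ¬ D_getSentenceStr l → out = getSentenceStr_alt l
instance (l : List (String × String)) (out : String) : Decidable (Spec_getSentenceStr l out) := by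
  unfold Spec_getSentenceStr; infer_instance

def pvDiffWitness_getSentenceStr : (List (String × String)) := [("w", "")]
def pvDiffWitnessOut_getSentenceStr : String × String := (" w/I-", " w/B-")

-- ===== CLAIM (what is proved, stated in full; the proofs are below) =====
def Claim_unchanged_getSentenceStr : Prop := ∀ (l : List (String × String)), Dom_getSentenceStr l → Spec_getSentenceStr l (getSentenceStr l)
def Claim_changed_getSentenceStr : Prop := Dom_getSentenceStr (pvDiffWitness_getSentenceStr) ∧ D_getSentenceStr (pvDiffWitness_getSentenceStr) ∧ getSentenceStr (pvDiffWitness_getSentenceStr) = pvDiffWitnessOut_getSentenceStr.1 ∧ getSentenceStr_alt (pvDiffWitness_getSentenceStr) = pvDiffWitnessOut_getSentenceStr.2 ∧ pvDiffWitnessOut_getSentenceStr.1 ≠ pvDiffWitnessOut_getSentenceStr.2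
def Claim_exact_getSentenceStr : Prop := ∀ (l : List (String × String)), Dom_getSentenceStr l → D_getSentenceStr l → getSentenceStr l ≠ getSentenceStr_alt l

-- ===== LEMMAS AND PROOFS =====

lemma foldl_append_shift (l : List String) (a : String) :
    l.foldl (· ++ ·) a = a ++ l.foldl (· ++ ·) "" := by
  induction l generalizing a with
  | nil => simp [List.foldl]
  | cons x xs ih =>
    simp only [List.foldl]
    rw [ih (a ++ x), ih ("" ++ x)]
    simp [String.append_assoc]

lemma join_cons (s : String) (l : List String) : String.join (s :: l) = s ++ String.join l := by
  simp only [String.join, List.foldl]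
  rw [foldl_append_shift]
  simp

lemma join_nil : String.join ([] : List String) = "" := rfl

lemma join_append (l₁ l₂ : List String) :
    String.join (l₁ ++ l₂) = String.join l₁ ++ String.join l₂ := by
  induction l₁ with
  | nil => simp [join_nil]
  | cons x xs ih => simp [join_cons, ih, String.append_assoc]

lemma litO : ("/O" : String) = "/" ++ "O" := rfl
lemma litB : ("/B-" : String) = "/" ++ "B-" := rfl
lemma litI : ("/I-" : String) = "/" ++ "I-" := rfl

lemma go_shift (l : List (String × String)) (res prev : String) :
    getSentenceStrGo l res prev = res ++ getSentenceStrGo l "" prev := by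
  induction l generalizing res prev with
  | nil => simp [getSentenceStrGo]
  | cons p rest ih =>
    obtain ⟨w, t⟩ := p
    simp only [getSentenceStrGo]
    rw [ih, ih ("" ++ " " ++ w ++ "/" ++ _)]
    simp [String.append_assoc]

lemma dropWhile_head_false {α : Type} (p : α → Bool) :
    ∀ (l : List α) (x : α) (xs : List α), l.dropWhile p = x :: xs → p x = false := by
  intro l
  induction l with
  | nil => intro x xs h; simp [List.dropWhile] at h
  | cons y ys ih =>
    intro x xs h
    by_cases hy : p y = true
    · rw [List.dropWhile_cons_of_pos hy] at h; exact ih x xs h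
    · rw [List.dropWhile_cons_of_neg hy] at h
      cases h; simpa using hy

-- A over a run of "O"-tagged pairs: each step appends " w/O" and keeps prevTag = "O".
lemma run_O : ∀ (same : List (String × String)) (rest : List (String × String)) (res : String),
    (∀ p ∈ same, p.2 = "O") →
    getSentenceStrGo (same ++ rest) res "O" =
      getSentenceStrGo rest (res ++ String.join (same.map (fun p => " " ++ p.1 ++ "/O"))) "O" := by
  intro same
  induction same with
  | nil => intro rest res _; simp [join_nil]
  | cons q qs ih =>
    intro rest res h
    obtain ⟨w, t⟩ := q
    have ht : t = "O" := h (w, t) (by simp)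
    subst ht
    simp only [List.cons_append, getSentenceStrGo,
      if_neg (show ¬(("O" : String) ≠ "O") from by simp)]
    rw [ih rest _ (fun p hp => h p (by simp [hp]))]
    congr 1
    rw [List.map_cons, join_cons]
    simp only [litO, String.append_assoc]

-- A over a run of t-tagged pairs (t ≠ "O") with prevTag already t: each appends " w/I-t".
lemma run_I : ∀ (same : List (String × String)) (rest : List (String × String)) (res t : String),
    t ≠ "O" → (∀ p ∈ same, p.2 = t) →
    getSentenceStrGo (same ++ rest) res t =
      getSentenceStrGo rest (res ++ String.join (same.map (fun p => " " ++ p.1 ++ "/I-" ++ t))) t := by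
  intro same
  induction same with
  | nil => intro rest res t _ _; simp [join_nil]
  | cons q qs ih =>
    intro rest res t htO h
    obtain ⟨w, tg⟩ := q
    have ht : tg = t := h (w, tg) (by simp)
    subst ht
    simp only [List.cons_append, getSentenceStrGo]
    rw [if_pos (show tg ≠ "O" from htO), if_pos (show (tg == tg) = true from by simp)]
    rw [ih rest _ tg htO (fun p hp => h p (by simp [hp]))]
    congr 1
    rw [List.map_cons, join_cons]
    simp only [litI, String.append_assoc]

lemma main_go : ∀ (fuel : ℕ) (l : List (String × String)) (prev : String), l.length ≤ fuel →
    (∀ w t rest, l = (w, t) :: rest → t ≠ "O" → t ≠ prev) →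
    getSentenceStrGo l "" prev = String.join (getSentenceStrAltGo fuel l) := by
  intro fuel
  induction fuel with
  | zero =>
    intro l prev hl _
    have : l = [] := List.eq_nil_of_length_eq_zero (Nat.le_zero.mp hl)
    subst this
    simp [getSentenceStrGo, getSentenceStrAltGo, String.join]
  | succ n ih =>
    intro l prev hl hhd
    cases l with
    | nil => simp [getSentenceStrGo, getSentenceStrAltGo, String.join]
    | cons q rest =>
      obtain ⟨w, t⟩ := q
      have hsplit : rest = rest.takeWhile (fun p => p.2 == t) ++ rest.dropWhile (fun p => p.2 == t) :=
        (List.takeWhile_append_dropWhile).symm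
      have hsame : ∀ p ∈ rest.takeWhile (fun p : String × String => p.2 == t), p.2 = t := by
        intro p hp
        have := List.mem_takeWhile_imp hp
        simpa using this
      have hlen : (rest.dropWhile (fun p : String × String => p.2 == t)).length ≤ n := by
        have h1 := List.length_dropWhile_le (fun p : String × String => p.2 == t) rest
        simp at hl; omega
      have hrest : ∀ w' t' rest', rest.dropWhile (fun p : String × String => p.2 == t) = (w', t') :: rest' →
          t' ≠ "O" → t' ≠ t := by
        intro w' t' rest' h _
        have := dropWhile_head_false _ _ _ _ h
        simpa using this
      by_cases htO : t = "O"
      · subst htO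
        simp only [getSentenceStrGo, if_neg (show ¬(("O" : String) ≠ "O") from by simp)]
        conv_lhs => rw [show rest = _ from hsplit]
        rw [go_shift, run_O _ _ _ hsame, go_shift, ih _ _ hlen hrest]
        simp only [getSentenceStrAltGo, if_pos (show (("O" : String) == "O") = true from by simp)]
        rw [join_append, join_cons]
        simp only [litO, String.append_assoc, String.empty_append]
      · have hBt : t ≠ prev := hhd w t rest rfl htO
        simp only [getSentenceStrGo]
        rw [if_pos (show t ≠ "O" from htO),
            if_neg (show ¬((t == prev) = true) from by simpa using hBt)]
        conv_lhs => rw [show rest = _ from hsplit]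
        rw [go_shift, run_I _ _ _ t htO hsame, go_shift, ih _ _ hlen hrest]
        simp only [getSentenceStrAltGo]
        rw [if_neg (show ¬((t == "O") = true) from by simpa using htO)]
        rw [join_append, join_cons]
        simp only [litB, String.append_assoc, String.empty_append]

-- ===== VERDICT (by name: the statement is the Claim_ definition above) =====
theorem getSentenceStr_spec : Claim_unchanged_getSentenceStr := by
  intro l _ hD
  unfold getSentenceStr getSentenceStr_alt
  apply main_go l.length l "" le_rfl
  intro w t rest hl htO hte
  apply hD
  subst hte
  simp [D_getSentenceStr, hl]

theorem getSentenceStr_changed : Claim_changed_getSentenceStr := by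
  unfold Claim_changed_getSentenceStr; decide

theorem getSentenceStr_tight : Claim_exact_getSentenceStr := by
  intro l _ hD heq
  unfold D_getSentenceStr at hD
  cases l with
  | nil => simp at hD
  | cons q rest =>
    obtain ⟨w, t⟩ := q
    simp at hD
    subst hD
    unfold getSentenceStr getSentenceStr_alt at heq
    simp only [List.length_cons, getSentenceStrGo, getSentenceStrAltGo] at heq
    rw [if_pos (by decide), if_pos (by simp), if_neg (by decide)] at heq
    rw [go_shift, join_append, join_cons] at heq
    simp only [litB, String.append_assoc, String.append_empty, String.empty_append] at heq
    -- both sides are " " ++ (w ++ ("/" ++ (tag-prefix ++ …))); cancel the common prefix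
    have h1 := (String.append_right_inj _).mp heq
    have h2 := (String.append_right_inj _).mp h1
    have h3 := (String.append_right_inj _).mp h2
    have h4 := congrArg String.toList h3
    rw [String.toList_append, String.toList_append] at h4
    rw [show ("I-" : String).toList = ['I', '-'] from by decide,
        show ("B-" : String).toList = ['B', '-'] from by decide] at h4
    simp at h4
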